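-- pv_equiv track=rewrite | github.com/shinglyu/vim-codespell | plugin/codespell.py | filter_multi_occurance
-- ===== SOURCE A (Python) =====
-- from collections import defaultdict
--
-- def filter_multi_occurance(words):
--     counts = defaultdict(lambda: 0)
--     for word in words:
--         counts[word] += 1
--     filtered = []
--     for word, count in counts.items():
--         # TODO: make this configurable
--         if count < 5:
--             filtered.append(word)
--     return filtered
-- ===== SOURCE B (Python) =====
-- def filter_multi_occurance(words):
--     counts = {}
--     result = []
--     for word in words:
--         c = counts.get(word, 0) + 1
--         counts[word] = c
--         if c == 1:
--             result.append(word)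
--         elif c == 5:
--             result = [w for w in result if w != word]
--     return result
-- ===== Notes on version B (the rewrite author's own statement) =====
-- stated objective: alternative
-- what changed: Single streaming pass that builds the result online (append on first occurrence, drop when a word's count reaches 5) instead of counting everything first and then iterating over counts.items().
import Mathlib
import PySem

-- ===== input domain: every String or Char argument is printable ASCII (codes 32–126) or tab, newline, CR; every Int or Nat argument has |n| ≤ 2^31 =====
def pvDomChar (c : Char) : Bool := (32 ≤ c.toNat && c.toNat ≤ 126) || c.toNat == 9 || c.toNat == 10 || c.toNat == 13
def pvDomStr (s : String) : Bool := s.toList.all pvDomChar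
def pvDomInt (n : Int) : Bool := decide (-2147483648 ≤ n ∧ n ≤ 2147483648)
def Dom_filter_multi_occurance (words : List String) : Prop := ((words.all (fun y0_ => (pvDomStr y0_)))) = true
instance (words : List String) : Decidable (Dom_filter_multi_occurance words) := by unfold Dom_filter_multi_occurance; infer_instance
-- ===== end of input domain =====

-- B builds the filtered list online in one streaming pass (append at first occurrence, remove when a
-- word's count reaches 5) instead of counting first and then looping over counts.items(); same cost.


-- ===== PORT A =====
def filter_multi_occurance (words : List String) : List String :=
  let counts := words.foldl (fun d word => d.modify word 0 (· + 1)) (PySem.Dict.empty : PySem.Dict String Int)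
  counts.items.foldl (fun filtered p => if p.2 < 5 then filtered ++ [p.1] else filtered) []

-- ===== PORT B =====
def filter_multi_occurance_alt (words : List String) : List String :=
  (words.foldl (fun (st : PySem.Dict String Int × List String) word =>
      let c := st.1.getD word 0 + 1
      let counts := st.1.insert word c
      let result :=
        if c = 1 then st.2 ++ [word]
        else if c = 5 then st.2.filter (fun w => w ≠ word)
        else st.2
      (counts, result)) (PySem.Dict.empty, [])).2

-- ===== PRECONDITION & SPEC =====
def Spec_filter_multi_occurance (words : List String) (out : List String) : Prop := out = filter_multi_occurance_alt words
instance (words : List String) (out : List String) : Decidable (Spec_filter_multi_occurance words out) := by unfold Spec_filter_multi_occurance; infer_instance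

-- ===== CLAIM (what is proved, stated in full; the proofs are below) =====
def Claim_equal_filter_multi_occurance : Prop := ∀ (words : List String), Dom_filter_multi_occurance words → Spec_filter_multi_occurance words (filter_multi_occurance words)

-- ===== LEMMAS AND PROOFS =====

/-- The common characterisation: distinct words in first-occurrence order whose count is < 5. -/
def pvRes (q : List String) : List String :=
  (PySem.Set.ofList q).filter (fun k => decide ((q.count k : Int) < 5))

/-- B's counting update, named so the invariant lemma can rewrite it. -/
def pvInsF (d : PySem.Dict String Int) (x : String) : PySem.Dict String Int :=
  d.insert x (d.getD x 0 + 1)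

/-- B's loop body, named. -/
def pvStep (st : PySem.Dict String Int × List String) (word : String) :
    PySem.Dict String Int × List String :=
  let c := st.1.getD word 0 + 1
  let counts := st.1.insert word c
  let result :=
    if c = 1 then st.2 ++ [word]
    else if c = 5 then st.2.filter (fun w => w ≠ word)
    else st.2
  (counts, result)

lemma pvRes_step (p : List String) (w : String) :
    pvRes (p ++ [w]) =
      (if (p.count w : Int) + 1 = 1 then pvRes p ++ [w]
       else if (p.count w : Int) + 1 = 5 then (pvRes p).filter (fun x => x ≠ w)
       else pvRes p) := by
  have hcount : ∀ k, (p ++ [w]).count k = p.count k + if w = k then 1 else 0 := by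
    intro k; simp [List.count_append, List.count_singleton]
  unfold pvRes
  rw [PySem.Set.ofList_append_singleton]
  by_cases hw : w ∈ PySem.Set.ofList p
  · have hwp : w ∈ p := (PySem.Set.mem_ofList p w).1 hw
    have hpos : 0 < p.count w := List.count_pos_iff.2 hwp
    rw [PySem.Set.add_of_mem hw]
    have h1 : ¬ ((p.count w : Int) + 1 = 1) := by omega
    rw [if_neg h1]
    by_cases h5 : (p.count w : Int) + 1 = 5
    · rw [if_pos h5, List.filter_filter]
      refine List.filter_congr ?_
      intro k hk
      rw [hcount k]
      by_cases hkw : w = k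
      · subst hkw
        simp; omega
      · have hkw' : ¬ (k = w) := fun h => hkw h.symm
        simp [hkw, hkw']
    · rw [if_neg h5]
      refine List.filter_congr ?_
      intro k hk
      rw [hcount k]
      by_cases hkw : w = k
      · subst hkw; simp; omega
      · simp [hkw]
  · have hwp : w ∉ p := fun h => hw ((PySem.Set.mem_ofList p w).2 h)
    have hc0 : p.count w = 0 := List.count_eq_zero.2 hwp
    rw [PySem.Set.add_of_not_mem hw, if_pos (by omega : (p.count w : Int) + 1 = 1)]
    rw [List.filter_append]
    congr 1
    · refine List.filter_congr ?_
      intro k hk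
      have hkp : k ∈ p := (PySem.Set.mem_ofList p k).1 hk
      have hkw : w ≠ k := fun he => hwp (he ▸ hkp)
      rw [hcount k]; simp [hkw]
    · simp [hc0]

lemma pvInsF_getD (p : List String) (w : String) :
    (p.foldl pvInsF PySem.Dict.empty).getD w 0 = (p.count w : Int) := by
  unfold pvInsF
  rw [PySem.Dict.getD_foldl_insert_add_one]
  simp

lemma pvStep_eq (p : List String) (w : String) :
    pvStep (p.foldl pvInsF PySem.Dict.empty, pvRes p) w
      = ((p ++ [w]).foldl pvInsF PySem.Dict.empty, pvRes (p ++ [w])) := by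
  unfold pvStep
  dsimp only
  rw [pvInsF_getD, pvRes_step]
  congr 1
  simp [List.foldl_append, pvInsF, pvInsF_getD]

/-- Loop invariant for B's single pass. -/
lemma alt_inv (l p : List String) :
    l.foldl pvStep (p.foldl pvInsF PySem.Dict.empty, pvRes p)
      = ((p ++ l).foldl pvInsF PySem.Dict.empty, pvRes (p ++ l)) := by
  induction l generalizing p with
  | nil => simp
  | cons w t ih =>
    rw [List.foldl_cons, pvStep_eq]
    rw [ih (p ++ [w])]
    simp

lemma alt_eq_pvRes (words : List String) : filter_multi_occurance_alt words = pvRes words := by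
  show (words.foldl pvStep (PySem.Dict.empty, [])).2 = pvRes words
  have h := alt_inv words []
  simp only [List.nil_append] at h
  rw [show (([] : List String).foldl pvInsF PySem.Dict.empty, pvRes []) = ((PySem.Dict.empty : PySem.Dict String Int), ([] : List String)) from rfl] at h
  rw [h]

lemma a_eq_pvRes (words : List String) : filter_multi_occurance words = pvRes words := by
  show (words.foldl (fun d word => d.modify word 0 (· + 1)) (PySem.Dict.empty : PySem.Dict String Int)).items.foldl
      (fun filtered p => if p.2 < 5 then filtered ++ [p.1] else filtered) [] = pvRes words
  show (PySem.Dict.counter words).items.foldl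
      (fun filtered p => if p.2 < 5 then filtered ++ [p.1] else filtered) [] = pvRes words
  rw [PySem.Dict.items_counter]
  rw [PySem.List.foldl_append_ite (p := fun q : String × Int => q.2 < 5) (f := fun q => q.1)]
  rw [List.filter_map, List.map_map]
  unfold pvRes
  simp [Function.comp_def]

-- ===== VERDICT (by name: the statement is the Claim_ definition above) =====
theorem filter_multi_occurance_spec : Claim_equal_filter_multi_occurance := by
  intro words _
  unfold Spec_filter_multi_occurance
  rw [a_eq_pvRes, alt_eq_pvRes]
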